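-- pv_equiv track=rewrite | github.com/Xt-EHR/xt-ehr-common | scripts/generate_logical_model_docx.py | find_parent_subtree_boundary
-- ===== SOURCE A (Python) =====
-- def parent_key(key: str) -> str:
--     if "." not in key:
--         return ""
--     return key.rsplit(".", 1)[0]
--
-- def find_parent_subtree_boundary(base_order: list[str], key: str) -> str | None:
--     parent = parent_key(key)
--     if not parent:
--         return None
--     if parent not in base_order:
--         return find_parent_subtree_boundary(base_order, parent)
--
--     parent_index = base_order.index(parent)
--     prefix = f"{parent}."
--     index = parent_index + 1
--     while index < len(base_order):
--         candidate = base_order[index]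
--         if candidate.startswith(prefix):
--             index += 1
--             continue
--         return candidate
--     return None
-- ===== SOURCE B (Python) =====
-- def parent_key(key: str) -> str:
--     if "." not in key:
--         return ""
--     return key.rsplit(".", 1)[0]
--
-- def find_parent_subtree_boundary(base_order, key):
--     # iterative climb instead of recursion, then a single next() scan
--     parent = parent_key(key)
--     while parent and parent not in base_order:
--         parent = parent_key(parent)
--     if not parent:
--         return None
--     prefix = parent + "."
--     idx = base_order.index(parent) + 1
--     return next((c for c in base_order[idx:] if not c.startswith(prefix)), None)
-- ===== Notes on version B (the rewrite author's own statement) =====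
-- stated objective: simpler
-- what changed: Replaces A's tail recursion on the key with an explicit iterative climb to the first ancestor present in base_order, and replaces the hand-written index-walking while loop with a single next()/find over the slice after the parent.
import Mathlib
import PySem

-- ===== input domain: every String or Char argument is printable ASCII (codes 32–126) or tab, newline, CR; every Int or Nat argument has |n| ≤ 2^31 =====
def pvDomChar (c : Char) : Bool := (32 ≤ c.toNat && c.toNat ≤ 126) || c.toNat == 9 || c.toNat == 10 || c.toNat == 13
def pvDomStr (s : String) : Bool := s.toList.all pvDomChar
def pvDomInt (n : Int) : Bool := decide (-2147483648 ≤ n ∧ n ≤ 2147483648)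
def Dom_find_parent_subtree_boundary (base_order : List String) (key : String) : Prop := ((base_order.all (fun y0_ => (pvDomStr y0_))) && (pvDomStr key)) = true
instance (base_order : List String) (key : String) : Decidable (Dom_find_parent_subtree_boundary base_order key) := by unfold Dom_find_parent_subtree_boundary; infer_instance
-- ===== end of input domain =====

-- B replaces A's tail recursion on the key by an explicit iterative climb to the first
-- ancestor present in base_order, and the index-walking while loop by a single find over
-- the tail after the parent; objective: simpler decomposition, same cost.

-- ===== PORT A =====
-- parent_key's body `key.rsplit(".", 1)[0]` = the characters before the LAST '.'
-- (and "" when "." not in key): ported by hand over List Char, exact — findIdx? on the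
-- reversed list locates the last '.', `none` is exactly the `"." not in key` branch.
def pvParentChars (l : List Char) : List Char :=
  match l.reverse.findIdx? (· == '.') with
  | none => []
  | some i => (l.reverse.drop (i + 1)).reverse

def parent_key_port (key : String) : String := String.ofList (pvParentChars key.toList)

-- termination helper for both ports (cited in their decreasing_by)
theorem pvParentChars_length_lt (l : List Char) (h : l ≠ []) :
    (pvParentChars l).length < l.length := by
  unfold pvParentChars
  cases hf : l.reverse.findIdx? (· == '.') with
  | none => simpa [List.length_pos_iff] using h
  | some i =>
    have hi : i < l.reverse.length := by
      have := List.findIdx?_eq_some_iff_findIdx_eq.mp hf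
      omega
    simp only [List.length_reverse] at hi ⊢
    simp only [List.length_drop, List.length_reverse]
    omega

theorem parent_key_port_length_lt (key : String) (h : key.toList ≠ []) :
    (parent_key_port key).toList.length < key.toList.length := by
  simpa [parent_key_port, String.toList_ofList] using pvParentChars_length_lt key.toList h

theorem pv_toList_ne_of_parent_ne (key : String) (h : parent_key_port key ≠ "") :
    key.toList ≠ [] := by
  intro hk
  apply h
  simp [parent_key_port, hk, pvParentChars]

-- A's `while index < len(base_order)` loop, walking candidates from parent_index + 1
def pvScanA : List String → String → Option String
  | [], _ => none
  | c :: rest, pre => if PySem.Str.startswith c pre then pvScanA rest pre else some c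

def find_parent_subtree_boundary (base_order : List String) (key : String) : Option String :=
  if parent_key_port key = "" then none
  else if parent_key_port key ∉ base_order then
    find_parent_subtree_boundary base_order (parent_key_port key)
  else
    match PySem.List.index? base_order (parent_key_port key) with
    | none => none   -- unreachable: the branch guarantees membership, so .index cannot raise
    | some parent_index =>
        pvScanA (base_order.drop (parent_index + 1)) (parent_key_port key ++ ".")
termination_by key.toList.length
decreasing_by exact parent_key_port_length_lt key (pv_toList_ne_of_parent_ne key (by assumption))

-- ===== PORT B =====
-- the `while parent and parent not in base_order:` climb of Source B
def pvClimb (base_order : List String) (parent : String) : String :=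
  if parent ≠ "" ∧ parent ∉ base_order then pvClimb base_order (parent_key_port parent)
  else parent
termination_by parent.toList.length
decreasing_by
  exact parent_key_port_length_lt parent (by
    intro hk
    rename_i hcond
    exact hcond.1 (String.toList_eq_nil_iff.mp hk))

-- the part of Source B after the while loop: the index lookup and the next()/find scan
def pvAltRest (base_order : List String) (parent : String) : Option String :=
  if parent = "" then none
  else
    match PySem.List.index? base_order parent with
    | none => none   -- unreachable: after the climb a nonempty parent is in base_order
    | some i =>
        List.find? (fun c => !(PySem.Str.startswith c (parent ++ "."))) (base_order.drop (i + 1))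

def find_parent_subtree_boundary_alt (base_order : List String) (key : String) : Option String :=
  pvAltRest base_order (pvClimb base_order (parent_key_port key))

-- ===== PRECONDITION & SPEC =====
def Spec_find_parent_subtree_boundary (base_order : List String) (key : String) (out : Option String) : Prop := out = find_parent_subtree_boundary_alt base_order key
instance (base_order : List String) (key : String) (out : Option String) : Decidable (Spec_find_parent_subtree_boundary base_order key out) := by unfold Spec_find_parent_subtree_boundary; infer_instance

-- ===== CLAIM (what is proved, stated in full; the proofs are below) =====
def Claim_equal_find_parent_subtree_boundary : Prop := ∀ (base_order : List String) (key : String), Dom_find_parent_subtree_boundary base_order key → Spec_find_parent_subtree_boundary base_order key (find_parent_subtree_boundary base_order key)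

-- ===== LEMMAS AND PROOFS =====
theorem pvScanA_eq_find? (l : List String) (pre : String) :
    pvScanA l pre = List.find? (fun c => !(PySem.Str.startswith c pre)) l := by
  induction l with
  | nil => rfl
  | cons c rest ih =>
    rw [pvScanA]
    by_cases h : PySem.Str.startswith c pre = true
    · have h' : PySem.Chars.startswith c.toList pre.toList = true := by simpa using h
      rw [if_pos h, List.find?_cons_of_neg (by simp [h']), ih]
    · have h' : PySem.Chars.startswith c.toList pre.toList = false := by simpa using h
      rw [if_neg h, List.find?_cons_of_pos (by simp [h'])]

theorem pv_main (base_order : List String) (key : String) :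
    find_parent_subtree_boundary base_order key =
      pvAltRest base_order (pvClimb base_order (parent_key_port key)) := by
  rw [find_parent_subtree_boundary]
  by_cases h0 : parent_key_port key = ""
  · rw [if_pos h0, h0]
    have hc : pvClimb base_order "" = "" := by rw [pvClimb]; simp
    rw [hc, pvAltRest]
    simp
  · by_cases h1 : parent_key_port key ∈ base_order
    · rw [if_neg h0, if_neg (by simpa using h1)]
      have hc : pvClimb base_order (parent_key_port key) = parent_key_port key := by
        rw [pvClimb, if_neg (by simp [h1])]
      rw [hc, pvAltRest, if_neg h0]
      cases hidx : PySem.List.index? base_order (parent_key_port key) with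
      | none => rfl
      | some i => simp only [pvScanA_eq_find?]
    · have hrec := pv_main base_order (parent_key_port key)
      rw [if_neg h0, if_pos h1, hrec]
      have hc : pvClimb base_order (parent_key_port key) =
          pvClimb base_order (parent_key_port (parent_key_port key)) := by
        conv_lhs => rw [pvClimb]
        rw [if_pos ⟨h0, h1⟩]
      rw [hc]
termination_by key.toList.length
decreasing_by exact parent_key_port_length_lt key (pv_toList_ne_of_parent_ne key h0)

-- ===== VERDICT (by name: the statement is the Claim_ definition above) =====
theorem find_parent_subtree_boundary_spec : Claim_equal_find_parent_subtree_boundary := by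
  intro base_order key _
  unfold Spec_find_parent_subtree_boundary find_parent_subtree_boundary_alt
  exact pv_main base_order key
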